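-- pv_equiv track=rewrite | github.com/pazars/headers_lsm | wikipedia.py | del_wiki_tab
-- ===== SOURCE A (Python) =====
-- def del_wiki_tab(page):
--     lev = 0
--     clean_page = ""
--
--     for i in range(0, len(page)):
--         # Current char
--         char = page[i]
--
--         # Previous char
--         if i >= 1:
--             pchar = page[i - 1]
--         else:
--             pchar = ""
--
--         # Previous previous char
--         if i >= 2:
--             ppchar = page[i - 2]
--         else:
--             pchar = ""
--
--         # Next char
--         if i < len(page) - 1:
--             nchar = page[i + 1]
--         else:
--             nchar = ""
--
--         # Going in a level: {|
--         if (char == "{") and (nchar == "|"):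
--             # print 'Going in'
--             # print page[i:i+50]
--             lev += 1
--
--         # Going out a level: |}
--         if (pchar == "}") and (ppchar == "|"):
--             # print 'Coming out'
--             # print page[i-2:i+50]
--             lev -= 1
--
--         # Failsafe for unbalanced tags: if there's a double linebreak assume the table is closed
--         # if (lev != 0) and (char == '\n') and (nchar == '\n'):
--         #    lev = 0
--
--         # Write if outside a table
--         if lev == 0:
--             clean_page += char
--
--     return clean_page
-- ===== SOURCE B (Python) =====
-- def _find_all(page, sub):
--     """All start positions of sub in page, ascending, via repeated str.find."""
--     positions = []
--     p = page.find(sub)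
--     while p != -1:
--         positions.append(p)
--         p = page.find(sub, p + 1)
--     return positions
--
-- def del_wiki_tab(page):
--     n = len(page)
--     # Sparse map: index -> net nesting-level change taking effect at that index
--     # ('{|' opens at its own index; '|}' closes two characters after it starts).
--     events = {}
--     for p in _find_all(page, "{|"):
--         events[p] = events.get(p, 0) + 1
--     for s in _find_all(page, "|}"):
--         if s + 2 < n:
--             events[s + 2] = events.get(s + 2, 0) - 1
--     # Jump from event to event, copying whole chunks that lie outside tables.
--     chunks = []
--     lev = 0
--     cur = 0
--     for e in sorted(events):
--         if lev == 0:
--             chunks.append(page[cur:e])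
--         lev += events[e]
--         cur = e
--     if lev == 0:
--         chunks.append(page[cur:])
--     return "".join(chunks)
-- ===== Notes on version B (the rewrite author's own statement) =====
-- stated objective: faster
-- what changed: Instead of A's per-character loop that rebuilds pchar/ppchar/nchar and appends one char at a time, B locates all '{|' and '|}' marker occurrences with repeated str.find, turns them into a sparse index->level-delta map, and then jumps from event to event copying whole slices that lie outside tables.
import Mathlib
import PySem

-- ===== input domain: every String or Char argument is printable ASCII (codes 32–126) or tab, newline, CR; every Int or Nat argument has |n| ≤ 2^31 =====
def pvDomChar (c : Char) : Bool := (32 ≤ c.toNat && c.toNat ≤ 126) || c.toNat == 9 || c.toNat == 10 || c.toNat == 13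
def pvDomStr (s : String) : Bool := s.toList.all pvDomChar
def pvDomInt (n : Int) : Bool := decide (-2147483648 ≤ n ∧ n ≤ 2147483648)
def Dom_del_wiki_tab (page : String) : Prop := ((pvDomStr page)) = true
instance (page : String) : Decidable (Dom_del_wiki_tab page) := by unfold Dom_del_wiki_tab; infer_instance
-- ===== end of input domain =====

-- B replaces A's per-character scan by locating the '{|' / '|}' markers with repeated find,
-- building a sparse index->level-delta dict, and copying whole slices between events
-- (objective: faster by a constant factor; same O(n) asymptotics).


-- ===== PORT A =====
-- Literal port of A. Python's one-char strings char/pchar/ppchar/nchar ("" when out of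
-- range) are modelled as List Char of length ≤ 1.  Note Python's second `if` block
-- overwrites pchar with "" when i < 2 (and leaves ppchar unassigned there, which is
-- never read because the `and` short-circuits); the port reproduces that: pchar is []
-- unless 2 ≤ i, and ppchar is modelled as [] when i < 2 (unread there).
def del_wiki_tab (page : String) : String :=
  let cs := page.toList
  let n : Int := PySem.Str.len page
  let r := (PySem.List.pyRange 0 n 1).foldl
    (fun (st : Int × List Char) i =>
      let char : List Char := [PySem.List.pyGetD cs i ' ']
      let pchar : List Char := if 1 ≤ i then [PySem.List.pyGetD cs (i - 1) ' '] else []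
      let pchar : List Char := if 2 ≤ i then pchar else []
      let ppchar : List Char := if 2 ≤ i then [PySem.List.pyGetD cs (i - 2) ' '] else []
      let nchar : List Char := if i < n - 1 then [PySem.List.pyGetD cs (i + 1) ' '] else []
      let lev := if char = ['{'] ∧ nchar = ['|'] then st.1 + 1 else st.1
      let lev := if pchar = ['}'] ∧ ppchar = ['|'] then lev - 1 else lev
      let clean := if lev = 0 then st.2 ++ char else st.2
      (lev, clean))
    (0, [])
  String.ofList r.2

-- ===== PORT B =====
-- port of Source B's _find_all: repeated str.find, restarting one past each hit
-- (fuel only makes the recursion total; it never runs out, see pvFindAllGo_eq below)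
def pvFindAllGo (page sub : String) (positions : List Int) (p : Int) (fuel : Nat) : List Int :=
  match fuel with
  | 0 => positions
  | Nat.succ fuel =>
    if p = -1 then positions
    else pvFindAllGo page sub (positions ++ [p]) (PySem.Str.findFrom page sub (p + 1) none) fuel

def pvFindAll (page sub : String) : List Int :=
  pvFindAllGo page sub [] (PySem.Str.find page sub) (page.toList.length + 1)

def del_wiki_tab_alt (page : String) : String :=
  let cs := page.toList
  let n : Int := PySem.Str.len page
  let events : PySem.Dict Int Int :=
    (pvFindAll page "{|").foldl (fun d p => d.insert p (d.getD p 0 + 1)) PySem.Dict.empty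
  let events : PySem.Dict Int Int :=
    (pvFindAll page "|}").foldl
      (fun d s => if s + 2 < n then d.insert (s + 2) (d.getD (s + 2) 0 - 1) else d) events
  let r := (PySem.List.sorted events.keys (fun x => x)).foldl
    (fun (st : List (List Char) × Int × Int) e =>
      let chunks := if st.2.1 = 0 then st.1 ++ [PySem.List.slice cs (some st.2.2) (some e)] else st.1
      (chunks, st.2.1 + events.getD e 0, e))
    ([], 0, 0)
  let chunks := if r.2.1 = 0 then r.1 ++ [PySem.List.slice cs (some r.2.2) none] else r.1
  String.ofList chunks.flatten

-- ===== PRECONDITION & SPEC =====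
def Spec_del_wiki_tab (page : String) (out : String) : Prop := out = del_wiki_tab_alt page
instance (page : String) (out : String) : Decidable (Spec_del_wiki_tab page out) := by unfold Spec_del_wiki_tab; infer_instance

-- ===== CLAIM (what is proved, stated in full; the proofs are below) =====
def Claim_equal_del_wiki_tab : Prop := ∀ (page : String), Dom_del_wiki_tab page → Spec_del_wiki_tab page (del_wiki_tab page)

-- ===== LEMMAS AND PROOFS =====

/-- Level change contributed while processing index `k` (shared normal form). -/
def pvDelta (cs : List Char) (k : Nat) : Int :=
  (if cs[k]? = some '{' ∧ cs[k + 1]? = some '|' then 1 else 0) +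
  (if 2 ≤ k ∧ cs[k - 2]? = some '|' ∧ cs[k - 1]? = some '}' then -1 else 0)

/-- Nesting level right after processing index `k`. -/
def pvLvl (cs : List Char) (k : Nat) : Int := ((List.range (k + 1)).map (pvDelta cs)).sum

/-- Characters of the first `m` indices kept at level 0. -/
def pvOut (cs : List Char) (m : Nat) : List Char :=
  ((List.range m).filter (fun k => pvLvl cs k = 0)).map (fun k => cs.getD k ' ')

theorem take_two_eq {α : Type} (l : List α) (a b : α) :
    l.take 2 = [a, b] ↔ l[0]? = some a ∧ l[1]? = some b := by
  match l with
  | [] => simp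
  | [x] => simp
  | x :: y :: r => simp [List.take]

theorem take_two_drop_eq (cs : List Char) (k : Nat) (a b : Char) :
    (cs.drop k).take 2 = [a, b] ↔ cs[k]? = some a ∧ cs[k + 1]? = some b := by
  rw [take_two_eq]
  simp [List.getElem?_drop]

-- ---------- A side ----------

/-- A's loop body at Nat index `y` (defeq to the lambda the port's fold uses). -/
def pvABody (cs : List Char) (st : Int × List Char) (y : Nat) : Int × List Char :=
  let i : Int := (y : Int)
  let char : List Char := [PySem.List.pyGetD cs i ' ']
  let pchar : List Char := if 1 ≤ i then [PySem.List.pyGetD cs (i - 1) ' '] else []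
  let pchar : List Char := if 2 ≤ i then pchar else []
  let ppchar : List Char := if 2 ≤ i then [PySem.List.pyGetD cs (i - 2) ' '] else []
  let nchar : List Char := if i < (cs.length : Int) - 1 then [PySem.List.pyGetD cs (i + 1) ' '] else []
  let lev := if char = ['{'] ∧ nchar = ['|'] then st.1 + 1 else st.1
  let lev := if pchar = ['}'] ∧ ppchar = ['|'] then lev - 1 else lev
  let clean := if lev = 0 then st.2 ++ char else st.2
  (lev, clean)

theorem condInc (cs : List Char) (m : Nat) (hm : m < cs.length) :
    (([PySem.List.pyGetD cs (m : Int) ' '] = ['{']) ∧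
      (if (m : Int) < (cs.length : Int) - 1 then [PySem.List.pyGetD cs ((m : Int) + 1) ' '] else []) = ['|'])
    ↔ (cs[m]? = some '{' ∧ cs[m + 1]? = some '|') := by
  have h1 : ((m : Int) + 1) = ((m + 1 : Nat) : Int) := by omega
  rw [h1, PySem.List.pyGetD_natCast, PySem.List.pyGetD_natCast]
  by_cases h : m + 1 < cs.length
  · have h2 : (m : Int) < (cs.length : Int) - 1 := by omega
    simp [h2, List.getD_eq_getElem?_getD, h, hm]
  · have h2 : ¬ ((m : Int) < (cs.length : Int) - 1) := by omega
    simp [h2, List.getElem?_eq_none (by omega : cs.length ≤ m + 1)]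

theorem condDec (cs : List Char) (m : Nat) (hm : m < cs.length) :
    (((if 2 ≤ (m : Int) then if 1 ≤ (m : Int) then [PySem.List.pyGetD cs ((m : Int) - 1) ' '] else [] else []) = ['}']) ∧
      ((if 2 ≤ (m : Int) then [PySem.List.pyGetD cs ((m : Int) - 2) ' '] else []) = ['|']))
    ↔ (2 ≤ m ∧ cs[m - 2]? = some '|' ∧ cs[m - 1]? = some '}') := by
  by_cases h : 2 ≤ m
  · have h2 : 2 ≤ (m : Int) := by omega
    have h1 : 1 ≤ (m : Int) := by omega
    have e1 : ((m : Int) - 1) = ((m - 1 : Nat) : Int) := by omega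
    have e2 : ((m : Int) - 2) = ((m - 2 : Nat) : Int) := by omega
    rw [e1, e2, PySem.List.pyGetD_natCast, PySem.List.pyGetD_natCast]
    simp [h2, h1, h, List.getD_eq_getElem?_getD,
      (by omega : m - 1 < cs.length), (by omega : m - 2 < cs.length), and_comm]
  · have h2 : ¬ (2 ≤ (m : Int)) := by omega
    simp [h2, h]

theorem pvABody_step (cs : List Char) (m : Nat) (hm : m < cs.length) (st : Int × List Char) :
    pvABody cs st m =
      (st.1 + pvDelta cs m,
       if st.1 + pvDelta cs m = 0 then st.2 ++ [cs.getD m ' '] else st.2) := by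
  unfold pvABody pvDelta
  have hInc : ([cs.getD m ' '] = ['{'] ∧
        (if (m : Int) < (cs.length : Int) - 1 then [PySem.List.pyGetD cs ((m : Int) + 1) ' '] else []) = ['|'])
      ↔ (cs[m]? = some '{' ∧ cs[m + 1]? = some '|') := by
    rw [← condInc cs m hm, PySem.List.pyGetD_natCast]
  simp only [PySem.List.pyGetD_natCast, hInc, condDec cs m hm]
  split_ifs <;> (try (exfalso; omega)) <;> norm_num <;> omega

theorem A_loop (cs : List Char) (m : Nat) (hm : m ≤ cs.length) :
    (List.range m).foldl (pvABody cs) (0, [])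
      = (((List.range m).map (pvDelta cs)).sum, pvOut cs m) := by
  induction m with
  | zero => simp [pvOut]
  | succ m ih =>
    rw [List.range_succ, List.foldl_append, ih (by omega), List.foldl_cons, List.foldl_nil,
      pvABody_step cs m (by omega)]
    refine Prod.ext ?_ ?_
    · simp
    · simp only [pvOut, List.range_succ, List.filter_append, List.map_append]
      have hl : pvLvl cs m = ((List.range m).map (pvDelta cs)).sum + pvDelta cs m := by
        simp [pvLvl, List.range_succ]
      by_cases h0 : ((List.range m).map (pvDelta cs)).sum + pvDelta cs m = 0
      · simp [h0, hl]
      · simp [h0, hl]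

theorem A_char (page : String) :
    del_wiki_tab page = String.ofList (pvOut page.toList page.toList.length) := by
  unfold del_wiki_tab
  simp only [PySem.Str.len_eq, PySem.List.pyRange_zero_nat, List.foldl_map]
  show String.ofList ((List.range page.toList.length).foldl (pvABody page.toList) (0, [])).2
      = String.ofList (pvOut page.toList page.toList.length)
  rw [A_loop page.toList page.toList.length le_rfl]

-- ---------- B side: occurrence lists ----------

theorem prefix_two (cs : List Char) (p : Nat) (a b : Char) :
    [a, b] <+: cs.drop p ↔ cs[p]? = some a ∧ cs[p + 1]? = some b := by
  rw [List.prefix_iff_eq_take, ← take_two_drop_eq cs p a b]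
  exact eq_comm

/-- All start positions of `pat` in `cs`, ascending. -/
def pvOccs (cs pat : List Char) : List Nat :=
  (List.range cs.length).filter (fun p => decide (pat <+: cs.drop p))

theorem pvOccs_nodup (cs pat : List Char) : (pvOccs cs pat).Nodup :=
  List.Nodup.filter _ (List.nodup_range)

theorem pvOccs_pairwise (cs pat : List Char) : (pvOccs cs pat).Pairwise (· < ·) :=
  List.Pairwise.filter _ (List.pairwise_lt_range)

theorem mem_pvOccs (cs pat : List Char) (p : Nat) :
    p ∈ pvOccs cs pat ↔ p < cs.length ∧ pat <+: cs.drop p := by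
  simp [pvOccs]

theorem pv_filter_ge_cons (l : List Nat) (k q : Nat) (hs : l.Pairwise (· < ·)) (hq : q ∈ l)
    (hkq : k ≤ q) (hmin : ∀ x ∈ l, k ≤ x → q ≤ x) :
    l.filter (fun x => decide (k ≤ x)) = q :: l.filter (fun x => decide (q + 1 ≤ x)) := by
  induction l with
  | nil => simp at hq
  | cons a t ih =>
    rw [List.pairwise_cons] at hs
    rcases List.mem_cons.1 hq with rfl | hqt
    · have h1 : t.filter (fun x => decide (k ≤ x)) = t :=
        List.filter_eq_self.2 (fun x hx => by have := hs.1 x hx; simp; omega)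
      have h2 : t.filter (fun x => decide (q + 1 ≤ x)) = t :=
        List.filter_eq_self.2 (fun x hx => by have := hs.1 x hx; simp; omega)
      rw [List.filter_cons, if_pos (by simpa using hkq), h1,
        List.filter_cons, if_neg (by simp), h2]
    · have haq : a < q := hs.1 q hqt
      have hak : a < k := by
        by_contra h
        have := hmin a List.mem_cons_self (by omega)
        omega
      have h1 : ¬ (k ≤ a) := by omega
      have h2 : ¬ (q + 1 ≤ a) := by omega
      simp only [List.filter_cons, h1, h2, decide_false, if_false, Bool.false_eq_true]
      exact ih hs.2 hqt (fun x hx hk => hmin x (List.mem_cons_of_mem _ hx) hk)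

theorem pvFindAllGo_eq (page sub : String) (hsub : sub.toList ≠ [])
    (fuel : Nat) : ∀ (k : Nat), k ≤ page.toList.length →
    page.toList.length + 1 - k ≤ fuel → ∀ (acc : List Int),
    pvFindAllGo page sub acc (PySem.Chars.findFrom page.toList sub.toList (k : Int) none) fuel
      = acc ++ ((pvOccs page.toList sub.toList).filter (fun p => decide (k ≤ p))).map
          (fun (p : Nat) => (p : Int)) := by
  induction fuel with
  | zero => intro k hk hf acc; omega
  | succ fuel ih =>
    intro k hk hf acc
    rw [PySem.Chars.findFrom_natCast page.toList sub.toList k hk]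
    by_cases hj : PySem.Chars.find (page.toList.drop k) sub.toList = -1
    · rw [if_pos hj]
      have hnone : ((pvOccs page.toList sub.toList).filter (fun p => decide (k ≤ p))) = [] := by
        rw [List.filter_eq_nil_iff]
        intro p hp hkp
        rw [mem_pvOccs] at hp
        simp only [decide_eq_true_eq] at hkp
        have hinf : sub.toList <:+: page.toList.drop k := by
          have hdd : page.toList.drop p = (page.toList.drop k).drop (p - k) := by
            rw [List.drop_drop]; congr 1; omega
          refine List.IsInfix.trans hp.2.isInfix ?_
          rw [hdd]
          exact (List.drop_suffix _ _).isInfix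
        rw [PySem.Chars.find_eq_neg_one_iff] at hj
        exact hj hinf
      simp [pvFindAllGo, hnone]
    · have h0 : 0 ≤ PySem.Chars.find (page.toList.drop k) sub.toList := by
        have := PySem.Chars.neg_one_le_find (page.toList.drop k) sub.toList
        omega
      obtain ⟨hpre, hmin⟩ := PySem.Chars.find_spec h0
      set j : Nat := (PySem.Chars.find (page.toList.drop k) sub.toList).toNat with hjdef
      have hjc : PySem.Chars.find (page.toList.drop k) sub.toList = (j : Int) :=
        (Int.toNat_of_nonneg h0).symm
      have hpre' : sub.toList <+: page.toList.drop (k + j) := by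
        rw [← List.drop_drop]
        exact hpre
      have hqn : k + j < page.toList.length := by
        by_contra h
        have : page.toList.drop (k + j) = [] := List.drop_eq_nil_of_le (by omega)
        rw [this] at hpre'
        exact hsub (List.prefix_nil.1 hpre')
      rw [if_neg hj, hjc]
      have hcast : (k : Int) + (j : Int) = ((k + j : Nat) : Int) := by push_cast; ring
      rw [hcast]
      have hne : ((k + j : Nat) : Int) ≠ -1 := by omega
      rw [pvFindAllGo, if_neg hne]
      have hstep : ((k + j : Nat) : Int) + 1 = ((k + j + 1 : Nat) : Int) := by push_cast; ring
      rw [PySem.Str.findFrom_eq, hstep,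
        ih (k + j + 1) (by omega) (by omega) (acc ++ [((k + j : Nat) : Int)])]
      have hsplit : (pvOccs page.toList sub.toList).filter (fun p => decide (k ≤ p))
          = (k + j) :: (pvOccs page.toList sub.toList).filter (fun p => decide (k + j + 1 ≤ p)) := by
        refine pv_filter_ge_cons _ k (k + j) (pvOccs_pairwise _ _)
          ((mem_pvOccs _ _ _).2 ⟨hqn, hpre'⟩) (by omega) ?_
        intro x hx hkx
        by_contra h
        have hxj : x - k < j := by omega
        have := hmin (x - k) hxj
        rw [mem_pvOccs] at hx
        have hdd : page.toList.drop x = (page.toList.drop k).drop (x - k) := by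
          rw [List.drop_drop]; congr 1; omega
        rw [hdd] at hx
        exact this hx.2
      rw [hsplit]
      simp

theorem pvFindAll_eq (page sub : String) (hsub : sub.toList ≠ []) :
    pvFindAll page sub = (pvOccs page.toList sub.toList).map (fun (p : Nat) => (p : Int)) := by
  unfold pvFindAll
  rw [PySem.Str.find_eq, ← PySem.Chars.findFrom_zero page.toList sub.toList]
  have h := pvFindAllGo_eq page sub hsub (page.toList.length + 1) 0 (by omega) (by omega) []
  rw [show ((0 : Nat) : Int) = (0 : Int) from rfl] at h
  rw [h, List.filter_eq_self.2 (fun x _ => by simp)]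
  simp

-- ---------- B side: the events dict ----------

def pvOpens (cs : List Char) : List Nat := pvOccs cs ['{', '|']
def pvCloses (cs : List Char) : List Nat :=
  ((pvOccs cs ['|', '}']).filter (fun s => decide (s + 2 < cs.length))).map (fun s => s + 2)
def pvEvts (cs : List Char) : List Nat :=
  (List.range cs.length).filter (fun e => decide (e ∈ pvOpens cs ∨ e ∈ pvCloses cs))

theorem mem_pvOpens (cs : List Char) (e : Nat) :
    e ∈ pvOpens cs ↔ cs[e]? = some '{' ∧ cs[e + 1]? = some '|' := by
  rw [pvOpens, mem_pvOccs, prefix_two]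
  constructor
  · exact fun h => h.2
  · intro h
    rcases List.getElem?_eq_some_iff.1 h.1 with ⟨h', _⟩
    exact ⟨h', h⟩

theorem mem_pvCloses (cs : List Char) (e : Nat) :
    e ∈ pvCloses cs ↔ 2 ≤ e ∧ e < cs.length ∧ cs[e - 2]? = some '|' ∧ cs[e - 1]? = some '}' := by
  rw [pvCloses]
  simp only [List.mem_map, List.mem_filter, mem_pvOccs, decide_eq_true_eq]
  constructor
  · rintro ⟨s, ⟨⟨hs, hp⟩, hlt⟩, rfl⟩
    rw [prefix_two] at hp
    refine ⟨by omega, hlt, ?_, ?_⟩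
    · have : s + 2 - 2 = s := by omega
      rw [this]; exact hp.1
    · have : s + 2 - 1 = s + 1 := by omega
      rw [this]; exact hp.2
  · rintro ⟨h2, hn, h1, h0⟩
    refine ⟨e - 2, ⟨⟨?_, ?_⟩, by omega⟩, by omega⟩
    · omega
    · rw [prefix_two]
      have he1 : e - 2 + 1 = e - 1 := by omega
      rw [he1]
      exact ⟨h1, h0⟩

theorem pvDelta_indicator (cs : List Char) (e : Nat) (he : e < cs.length) :
    pvDelta cs e = (if e ∈ pvOpens cs then (1 : Int) else 0) +
      (if e ∈ pvCloses cs then (-1 : Int) else 0) := by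
  rw [pvDelta]
  have h1 : (if cs[e]? = some '{' ∧ cs[e + 1]? = some '|' then (1 : Int) else 0)
      = (if e ∈ pvOpens cs then (1 : Int) else 0) := by
    by_cases h : e ∈ pvOpens cs
    · rw [if_pos ((mem_pvOpens cs e).1 h), if_pos h]
    · rw [if_neg (fun hc => h ((mem_pvOpens cs e).2 hc)), if_neg h]
  have h2 : (if 2 ≤ e ∧ cs[e - 2]? = some '|' ∧ cs[e - 1]? = some '}' then (-1 : Int) else 0)
      = (if e ∈ pvCloses cs then (-1 : Int) else 0) := by
    by_cases h : e ∈ pvCloses cs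
    · rcases (mem_pvCloses cs e).1 h with ⟨ha, _, hb, hc⟩
      rw [if_pos ⟨ha, hb, hc⟩, if_pos h]
    · rw [if_neg (fun hc => h ((mem_pvCloses cs e).2 ⟨hc.1, he, hc.2.1, hc.2.2⟩)), if_neg h]
  rw [h1, h2]

theorem pv_foldl_guard {α β γ : Type} (l : List α) (P : α → Prop) [DecidablePred P]
    (h : α → β) (g : γ → β → γ) (d : γ) :
    l.foldl (fun d s => if P s then g d (h s) else d) d
      = ((l.filter (fun s => decide (P s))).map h).foldl g d := by
  induction l generalizing d with
  | nil => rfl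
  | cons a t ih =>
    by_cases hp : P a <;> simp [List.filter_cons, hp, ih]

theorem pv_getD_foldl_insert_sub (l : List Int) (d : PySem.Dict Int Int) (v : Int) :
    (l.foldl (fun d x => d.insert x (d.getD x 0 - 1)) d).getD v 0 = d.getD v 0 - l.count v := by
  induction l generalizing d with
  | nil => simp
  | cons x t ih =>
    rw [List.foldl_cons, ih, PySem.Dict.getD_insert, List.count_cons]
    by_cases hvx : v = x
    · subst hvx; simp; ring
    · have : ¬ (x = v) := fun h => hvx h.symm
      simp [hvx, this]

/-- The events dict built by B's two loops (same expression as in the port). -/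
def pvEventsD (page : String) : PySem.Dict Int Int :=
  (pvFindAll page "|}").foldl
    (fun d s => if s + 2 < PySem.Str.len page then d.insert (s + 2) (d.getD (s + 2) 0 - 1) else d)
    ((pvFindAll page "{|").foldl (fun d p => d.insert p (d.getD p 0 + 1)) PySem.Dict.empty)

theorem closesInt_eq (page : String) :
    ((pvFindAll page "|}").filter (fun s => decide (s + 2 < PySem.Str.len page))).map (fun s => s + 2)
      = (pvCloses page.toList).map (fun (e : Nat) => (e : Int)) := by
  rw [pvFindAll_eq page "|}" (by decide),
    show ("|}" : String).toList = ['|', '}'] from rfl,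
    List.filter_map, List.map_map, pvCloses, List.map_map]
  rw [List.filter_congr (l := pvOccs page.toList ['|', '}'])
      (q := fun s => decide (s + 2 < page.toList.length)) (fun x _ => by
        simp only [Function.comp_apply, PySem.Str.len_eq, decide_eq_decide]
        omega)]
  refine List.map_congr_left (fun x _ => ?_)
  simp only [Function.comp_apply]
  push_cast
  ring

theorem opensInt_eq (page : String) :
    pvFindAll page "{|" = (pvOpens page.toList).map (fun (e : Nat) => (e : Int)) := by
  rw [pvFindAll_eq page "{|" (by decide)]
  rfl

theorem pvEventsD_guard (page : String) :
    pvEventsD page = ((pvCloses page.toList).map (fun (e : Nat) => (e : Int))).foldl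
      (fun d s => d.insert s (d.getD s 0 - 1))
      (((pvOpens page.toList).map (fun (e : Nat) => (e : Int))).foldl
        (fun d p => d.insert p (d.getD p 0 + 1)) PySem.Dict.empty) := by
  have hg := pv_foldl_guard (α := Int) (β := Int) (γ := PySem.Dict Int Int)
    (pvFindAll page "|}") (fun s => s + 2 < PySem.Str.len page)
    (fun s => s + 2) (fun d y => d.insert y (d.getD y 0 - 1))
    (((pvFindAll page "{|")).foldl (fun d p => d.insert p (d.getD p 0 + 1)) PySem.Dict.empty)
  rw [pvEventsD, hg, closesInt_eq, opensInt_eq]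

theorem pvOpens_nodup (cs : List Char) : (pvOpens cs).Nodup := pvOccs_nodup cs _

theorem pvCloses_nodup (cs : List Char) : (pvCloses cs).Nodup := by
  refine List.Nodup.map (fun a b h => by omega) (List.Nodup.filter _ (pvOccs_nodup cs _))

theorem int_map_nodup (l : List Nat) (h : l.Nodup) : (l.map (fun (e : Nat) => (e : Int))).Nodup :=
  List.Nodup.map (fun a b hab => by exact_mod_cast hab) h

theorem pvEventsD_getD (page : String) (v : Int) :
    (pvEventsD page).getD v 0
      = (((pvOpens page.toList).map (fun (e : Nat) => (e : Int))).count v : Int)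
        - (((pvCloses page.toList).map (fun (e : Nat) => (e : Int))).count v : Int) := by
  rw [pvEventsD_guard, pv_getD_foldl_insert_sub, PySem.Dict.getD_foldl_insert_add_one,
    PySem.Dict.getD_empty]
  ring

theorem pvEventsD_getD_delta (page : String) (e : Nat) (he : e < page.toList.length) :
    (pvEventsD page).getD (e : Int) 0 = pvDelta page.toList e := by
  rw [pvEventsD_getD, pvDelta_indicator page.toList e he]
  have hco : ((pvOpens page.toList).map (fun (x : Nat) => (x : Int))).count (e : Int)
      = if e ∈ pvOpens page.toList then 1 else 0 := by
    by_cases h : e ∈ pvOpens page.toList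
    · rw [if_pos h]
      exact List.count_eq_one_of_mem (int_map_nodup _ (pvOpens_nodup _)) (by simpa using h)
    · rw [if_neg h]
      exact List.count_eq_zero.2 (by simpa using h)
  have hcc : ((pvCloses page.toList).map (fun (x : Nat) => (x : Int))).count (e : Int)
      = if e ∈ pvCloses page.toList then 1 else 0 := by
    by_cases h : e ∈ pvCloses page.toList
    · rw [if_pos h]
      exact List.count_eq_one_of_mem (int_map_nodup _ (pvCloses_nodup _)) (by simpa using h)
    · rw [if_neg h]
      exact List.count_eq_zero.2 (by simpa using h)
  rw [hco, hcc]
  by_cases h1 : e ∈ pvOpens page.toList <;> by_cases h2 : e ∈ pvCloses page.toList <;>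
    simp [h1, h2]

theorem pvEventsD_keys_mem (page : String) (v : Int) :
    v ∈ (pvEventsD page).keys ↔
      v ∈ (pvOpens page.toList).map (fun (e : Nat) => (e : Int))
        ∨ v ∈ (pvCloses page.toList).map (fun (e : Nat) => (e : Int)) := by
  rw [pvEventsD_guard, PySem.Dict.keys_foldl_insert, PySem.Dict.keys_foldl_insert,
    PySem.Dict.keys_empty]
  rw [PySem.Set.mem_update, PySem.Set.mem_update]
  simp

theorem pvEventsD_keys_nodup (page : String) : (pvEventsD page).keys.Nodup := by
  rw [pvEventsD_guard]
  exact PySem.Dict.nodup_keys_foldl_insert _ _ _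
    (PySem.Dict.nodup_keys_foldl_insert _ _ _ PySem.Dict.nodup_keys_empty)

theorem mem_pvEvts (cs : List Char) (e : Nat) :
    e ∈ pvEvts cs ↔ e ∈ pvOpens cs ∨ e ∈ pvCloses cs := by
  rw [pvEvts]
  simp only [List.mem_filter, List.mem_range, decide_eq_true_eq]
  constructor
  · exact fun h => h.2
  · intro h
    refine ⟨?_, h⟩
    rcases h with h | h
    · rw [mem_pvOpens] at h
      rcases List.getElem?_eq_some_iff.1 h.1 with ⟨h', _⟩
      exact h'
    · exact ((mem_pvCloses cs e).1 h).2.1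

theorem pvEvts_nodup (cs : List Char) : (pvEvts cs).Nodup :=
  List.Nodup.filter _ (List.nodup_range)

theorem pvEvts_pairwise (cs : List Char) : (pvEvts cs).Pairwise (· < ·) :=
  List.Pairwise.filter _ (List.pairwise_lt_range)

theorem pvEvts_lt (cs : List Char) (e : Nat) (h : e ∈ pvEvts cs) : e < cs.length := by
  rw [pvEvts] at h
  exact List.mem_range.1 (List.mem_filter.1 h).1

theorem sorted_keys_eq (page : String) :
    PySem.List.sorted (pvEventsD page).keys (fun x => x)
      = (pvEvts page.toList).map (fun (e : Nat) => (e : Int)) := by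
  refine PySem.List.sorted_eq_of_perm_of_pairwise_lt _ _ _ ?_ ?_
  · rw [List.perm_ext_iff_of_nodup
      (int_map_nodup _ (pvEvts_nodup page.toList)) (pvEventsD_keys_nodup page)]
    intro v
    rw [pvEventsD_keys_mem]
    simp only [List.mem_map]
    constructor
    · rintro ⟨e, he, rfl⟩
      rcases (mem_pvEvts _ _).1 he with h | h
      · exact Or.inl ⟨e, h, rfl⟩
      · exact Or.inr ⟨e, h, rfl⟩
    · rintro (⟨e, he, rfl⟩ | ⟨e, he, rfl⟩)
      · exact ⟨e, (mem_pvEvts _ _).2 (Or.inl he), rfl⟩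
      · exact ⟨e, (mem_pvEvts _ _).2 (Or.inr he), rfl⟩
  · refine List.Pairwise.map _ (fun a b hab => ?_) (pvEvts_pairwise page.toList)
    exact_mod_cast hab

-- ---------- B side: the chunk walk ----------

def pvS (cs : List Char) (m : Nat) : Int := ((List.range m).map (pvDelta cs)).sum

/-- Characters at indices in [m, length) kept at level 0. -/
def pvKeep (cs : List Char) (m : Nat) : List Char :=
  ((List.range' m (cs.length - m)).filter (fun i => decide (pvLvl cs i = 0))).map
    (fun i => cs.getD i ' ')

/-- The walk B performs over the sorted events, in recursive normal form. -/
def pvW (cs : List Char) (es : List Nat) (lev : Int) (cur : Nat) : List Char :=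
  match es with
  | [] => if lev = 0 then cs.drop cur else []
  | e :: rest =>
      (if lev = 0 then (cs.drop cur).take (e - cur) else []) ++ pvW cs rest (lev + pvDelta cs e) e

theorem pvS_succ (cs : List Char) (m : Nat) : pvS cs (m + 1) = pvS cs m + pvDelta cs m := by
  simp [pvS, List.range_succ]

theorem pvLvl_eq_pvS (cs : List Char) (k : Nat) : pvLvl cs k = pvS cs (k + 1) := rfl

theorem pvS_const (cs : List Char) (a : Nat) : ∀ (b : Nat), a ≤ b →
    (∀ j, a ≤ j → j < b → pvDelta cs j = 0) → pvS cs b = pvS cs a := by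
  intro b
  induction b with
  | zero => intro hab _; rw [Nat.le_zero.1 hab]
  | succ b ih =>
    intro hab hz
    rcases Nat.lt_or_ge a (b + 1) with h | h
    · have hab' : a ≤ b := by omega
      rw [pvS_succ, ih hab' (fun j h1 h2 => hz j h1 (by omega)), hz b hab' (by omega), add_zero]
    · have ha : a = b + 1 := by omega
      rw [ha]

theorem map_getD_range' (cs : List Char) (m k : Nat) (h : m + k ≤ cs.length) :
    (List.range' m k).map (fun i => cs.getD i ' ') = (cs.drop m).take k := by
  apply List.ext_getElem
  · simp only [List.length_map, List.length_range', List.length_take, List.length_drop]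
    omega
  · intro j h1 h2
    simp only [List.length_map, List.length_range'] at h1
    simp only [List.getElem_map, List.getElem_range', List.getElem_take, List.getElem_drop,
      Nat.one_mul]
    rw [List.getD_eq_getElem cs ' ' (by omega)]

theorem pvW_eq (cs : List Char) (es : List Nat) : ∀ (lev : Int) (cur : Nat),
    cur ≤ cs.length →
    es.Pairwise (· < ·) →
    (∀ e ∈ es, cur < e ∧ e < cs.length) →
    (∀ i, cur < i → i < cs.length → pvDelta cs i ≠ 0 → i ∈ es) →
    lev = pvS cs (cur + 1) →
    pvW cs es lev cur = pvKeep cs cur := by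
  induction es with
  | nil =>
    intro lev cur hcur _ _ hcov hlev
    have hall : ∀ i, cur ≤ i → i < cs.length → pvLvl cs i = lev := by
      intro i h1 h2
      rw [pvLvl_eq_pvS, hlev]
      exact pvS_const cs (cur + 1) (i + 1) (by omega)
        (fun j hj1 hj2 => by
          by_contra hne
          have := hcov j (by omega) (by omega) hne
          simp at this)
    rw [pvW, pvKeep]
    by_cases hl : lev = 0
    · rw [if_pos hl,
        List.filter_eq_self.2 (fun i hi => by
          rw [List.mem_range'_1] at hi
          simp [hall i hi.1 (by omega), hl]),
        map_getD_range' cs cur (cs.length - cur) (by omega)]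
      rw [List.take_of_length_le (by simp)]
    · rw [if_neg hl,
        List.filter_eq_nil_iff.2 (fun i hi => by
          rw [List.mem_range'_1] at hi
          simp [hall i hi.1 (by omega), hl]),
        List.map_nil]
  | cons e rest ih =>
    intro lev cur hcur hpw hmem hcov hlev
    obtain ⟨hce, hen⟩ := hmem e List.mem_cons_self
    rw [List.pairwise_cons] at hpw
    have hzero : ∀ j, cur < j → j < e → pvDelta cs j = 0 := by
      intro j h1 h2
      by_contra hne
      rcases List.mem_cons.1 (hcov j h1 (by omega) hne) with rfl | hjr
      · omega
      · have := hpw.1 j hjr; omega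
    have hseg : ∀ i, cur ≤ i → i < e → pvLvl cs i = lev := by
      intro i h1 h2
      rw [pvLvl_eq_pvS, hlev]
      exact pvS_const cs (cur + 1) (i + 1) (by omega)
        (fun j hj1 hj2 => hzero j (by omega) (by omega))
    have hr1 : List.range' cur (cs.length - cur)
        = List.range' cur (e - cur) ++ List.range' e (cs.length - e) := by
      have h := List.range'_append (s := cur) (m := e - cur) (n := cs.length - e) (step := 1)
      rw [show cur + 1 * (e - cur) = e by omega] at h
      rw [show cs.length - cur = (e - cur) + (cs.length - e) by omega, ← h]
    have hkeep : pvKeep cs cur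
        = ((List.range' cur (e - cur)).filter (fun i => decide (pvLvl cs i = 0))).map
            (fun i => cs.getD i ' ') ++ pvKeep cs e := by
      rw [pvKeep, hr1, List.filter_append, List.map_append, pvKeep]
    rw [pvW, hkeep]
    have hrest : pvW cs rest (lev + pvDelta cs e) e = pvKeep cs e := by
      refine ih (lev + pvDelta cs e) e (by omega) hpw.2
        (fun x hx => ⟨hpw.1 x hx, (hmem x (List.mem_cons_of_mem _ hx)).2⟩)
        (fun i h1 h2 hne => by
          rcases List.mem_cons.1 (hcov i (by omega) h2 hne) with rfl | hir
          · omega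
          · exact hir)
        ?_
      rw [pvS_succ, hlev]
      congr 1
      exact (pvS_const cs (cur + 1) e (by omega) (fun j h1 h2 => hzero j (by omega) h2)).symm
    rw [hrest]
    congr 1
    by_cases hl : lev = 0
    · rw [if_pos hl,
        List.filter_eq_self.2 (fun i hi => by
          rw [List.mem_range'_1] at hi
          simp [hseg i hi.1 (by omega), hl]),
        map_getD_range' cs cur (e - cur) (by omega)]
    · rw [if_neg hl,
        List.filter_eq_nil_iff.2 (fun i hi => by
          rw [List.mem_range'_1] at hi
          simp [hseg i hi.1 (by omega), hl]),
        List.map_nil]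

theorem pvDelta_mem_pvEvts (cs : List Char) (i : Nat) (hi : i < cs.length)
    (hne : pvDelta cs i ≠ 0) : i ∈ pvEvts cs := by
  rw [mem_pvEvts]
  by_contra h
  rw [not_or] at h
  rw [pvDelta_indicator cs i hi, if_neg h.1, if_neg h.2] at hne
  exact hne rfl

theorem pvW_init (cs : List Char) : pvW cs (pvEvts cs) 0 0 = pvKeep cs 0 := by
  by_cases h0 : 0 ∈ pvEvts cs
  · cases hE : pvEvts cs with
    | nil => rw [hE] at h0; simp at h0
    | cons a t =>
      have ha : a = 0 := by
        rw [hE] at h0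
        rcases List.mem_cons.1 h0 with h | h
        · omega
        · have hp := pvEvts_pairwise cs
          rw [hE, List.pairwise_cons] at hp
          have := hp.1 0 h
          omega
      subst ha
      have hp := pvEvts_pairwise cs
      rw [hE, List.pairwise_cons] at hp
      rw [pvW, if_pos rfl, Nat.sub_zero, List.take_zero, List.nil_append, zero_add]
      refine pvW_eq cs t (pvDelta cs 0) 0 (by omega) hp.2
        (fun x hx => ⟨hp.1 x hx, pvEvts_lt cs x (by rw [hE]; exact List.mem_cons_of_mem _ hx)⟩)
        (fun i h1 h2 hne => by
          rcases List.mem_cons.1 (by rw [← hE]; exact pvDelta_mem_pvEvts cs i h2 hne) with rfl | h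
          · omega
          · exact h)
        ?_
      rw [pvS_succ]
      simp [pvS]
  · have hd0 : cs.length = 0 ∨ pvDelta cs 0 = 0 := by
      rcases Nat.eq_zero_or_pos cs.length with h | h
      · exact Or.inl h
      · by_contra hne
        rw [not_or] at hne
        exact h0 (pvDelta_mem_pvEvts cs 0 h hne.2)
    rcases hd0 with hn | hd
    · have hcs : cs = [] := List.length_eq_zero_iff.1 hn
      subst hcs
      have hE : pvEvts ([] : List Char) = [] := by
        simp [pvEvts]
      rw [hE, pvW, if_pos rfl]
      simp [pvKeep]
    · refine pvW_eq cs (pvEvts cs) 0 0 (by omega) (pvEvts_pairwise cs)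
        (fun e he => ⟨by
          rcases Nat.eq_zero_or_pos e with rfl | h
          · exact absurd he h0
          · omega, pvEvts_lt cs e he⟩)
        (fun i h1 h2 hne => pvDelta_mem_pvEvts cs i h2 hne)
        ?_
      rw [pvS_succ, hd]
      simp [pvS]

theorem fold_flatten (page : String) (es : List Nat)
    (hd : ∀ e ∈ es, (pvEventsD page).getD (e : Int) 0 = pvDelta page.toList e) :
    ∀ (acc : List (List Char)) (lev : Int) (cur : Nat),
    (let r := es.foldl
        (fun (st : List (List Char) × Int × Int) e =>
          (if st.2.1 = 0 then st.1 ++ [PySem.List.slice page.toList (some st.2.2) (some ((e : Nat) : Int))] else st.1,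
           st.2.1 + (pvEventsD page).getD ((e : Nat) : Int) 0, ((e : Nat) : Int)))
        (acc, lev, (cur : Int))
     (if r.2.1 = 0 then r.1 ++ [PySem.List.slice page.toList (some r.2.2) none] else r.1).flatten)
      = acc.flatten ++ pvW page.toList es lev cur := by
  induction es with
  | nil =>
    intro acc lev cur
    simp only [List.foldl_nil, pvW]
    rw [PySem.List.slice_from_natCast]
    by_cases hl : lev = 0 <;> simp [hl]
  | cons e rest ih =>
    intro acc lev cur
    have hde := hd e List.mem_cons_self
    have hd' : ∀ x ∈ rest, (pvEventsD page).getD (x : Int) 0 = pvDelta page.toList x :=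
      fun x hx => hd x (List.mem_cons_of_mem _ hx)
    simp only [List.foldl_cons]
    rw [hde]
    have hih := ih hd'
      (if lev = 0 then acc ++ [PySem.List.slice page.toList (some (cur : Int)) (some (e : Int))] else acc)
      (lev + pvDelta page.toList e) e
    simp only at hih
    rw [hih, pvW]
    rw [PySem.List.slice_natCast]
    by_cases hl : lev = 0 <;> simp [hl]

theorem pvKeep_zero (cs : List Char) : pvKeep cs 0 = pvOut cs cs.length := by
  rw [pvKeep, pvOut, List.range_eq_range', Nat.sub_zero]

theorem B_char (page : String) :
    del_wiki_tab_alt page = String.ofList (pvOut page.toList page.toList.length) := by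
  have h0 : del_wiki_tab_alt page =
      (let r := (PySem.List.sorted (pvEventsD page).keys (fun x => x)).foldl
        (fun (st : List (List Char) × Int × Int) e =>
          (if st.2.1 = 0 then st.1 ++ [PySem.List.slice page.toList (some st.2.2) (some e)] else st.1,
           st.2.1 + (pvEventsD page).getD e 0, e)) ([], 0, 0)
       String.ofList (if r.2.1 = 0 then r.1 ++ [PySem.List.slice page.toList (some r.2.2) none] else r.1).flatten) := rfl
  rw [h0, sorted_keys_eq]
  simp only [List.foldl_map]
  have hd : ∀ e ∈ pvEvts page.toList,
      (pvEventsD page).getD (e : Int) 0 = pvDelta page.toList e :=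
    fun e he => pvEventsD_getD_delta page e (pvEvts_lt page.toList e he)
  have h := fold_flatten page (pvEvts page.toList) hd [] 0 0
  simp only at h
  rw [show ((0 : Nat) : Int) = (0 : Int) from rfl] at h
  rw [h, List.flatten_nil, List.nil_append, pvW_init, pvKeep_zero]

-- ===== VERDICT (by name: the statement is the Claim_ definition above) =====
theorem del_wiki_tab_spec : Claim_equal_del_wiki_tab := by
  intro page _
  unfold Spec_del_wiki_tab
  rw [A_char, B_char]
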